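-- pv_equiv track=rewrite | github.com/doslim/Evaluate-the-Opinion-Leadership-of-LLMs | role.py | take_order
-- ===== SOURCE A (Python) =====
-- def take_order(remaining_players_ids, first_player_id, left = True) -> list:
--     statement_order = []
--     first_player_idx = remaining_players_ids.index(first_player_id)
--     for i in range(len(remaining_players_ids)):
--         if left:
--             statement_order.append(remaining_players_ids[first_player_idx - i])
--         else:
--             temp = first_player_idx + i
--             if temp > len(remaining_players_ids) - 1:
--                 temp = temp - len(remaining_players_ids)
--             statement_order.append(remaining_players_ids[temp])
--
--     return statement_order
-- ===== SOURCE B (Python) =====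
-- def take_order(remaining_players_ids, first_player_id, left=True) -> list:
--     # Closed-form rotation by slicing instead of an elementwise modular-index loop.
--     idx = remaining_players_ids.index(first_player_id)
--     if left:
--         return remaining_players_ids[:idx + 1][::-1] + remaining_players_ids[idx + 1:][::-1]
--     return remaining_players_ids[idx:] + remaining_players_ids[:idx]
-- ===== Notes on version B (the rewrite author's own statement) =====
-- stated objective: simpler
-- what changed: Replaces the elementwise loop with per-index wrap arithmetic by a closed-form slice concatenation (reversed prefix/suffix for left, rotation slices for right).
import Mathlib
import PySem

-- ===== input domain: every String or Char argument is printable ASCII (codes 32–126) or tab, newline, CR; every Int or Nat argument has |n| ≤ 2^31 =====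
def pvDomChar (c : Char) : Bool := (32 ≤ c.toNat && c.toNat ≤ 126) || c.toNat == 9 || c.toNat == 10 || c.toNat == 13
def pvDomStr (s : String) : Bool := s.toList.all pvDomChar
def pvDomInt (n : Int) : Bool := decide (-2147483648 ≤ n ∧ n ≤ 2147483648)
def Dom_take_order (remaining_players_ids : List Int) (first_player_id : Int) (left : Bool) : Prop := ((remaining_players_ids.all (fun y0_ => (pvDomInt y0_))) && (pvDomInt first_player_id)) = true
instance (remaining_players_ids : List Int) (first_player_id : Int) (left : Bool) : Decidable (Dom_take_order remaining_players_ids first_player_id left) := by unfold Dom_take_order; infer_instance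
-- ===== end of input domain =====

-- B computes the rotation as a closed-form slice concatenation instead of A's elementwise
-- modular-index loop; equivalence is about the return value (no argument is mutated).

-- ===== PORT A =====
def take_order (remaining_players_ids : List Int) (first_player_id : Int) (left : Bool) : List Int :=
  match PySem.List.index? remaining_players_ids first_player_id with
  | none => []  -- Python raises ValueError here; excluded by Pre_take_order
  | some first_player_idx =>
    (PySem.List.pyRange 0 remaining_players_ids.length 1).foldl
      (fun statement_order i =>
        if left then
          statement_order ++ [PySem.List.pyGetD remaining_players_ids ((first_player_idx : Int) - i) 0]
        else
          let temp := (first_player_idx : Int) + i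
          let temp := if temp > (remaining_players_ids.length : Int) - 1
                      then temp - (remaining_players_ids.length : Int) else temp
          statement_order ++ [PySem.List.pyGetD remaining_players_ids temp 0]) []

-- ===== PORT B =====
def take_order_alt (remaining_players_ids : List Int) (first_player_id : Int) (left : Bool) : List Int :=
  match PySem.List.index? remaining_players_ids first_player_id with
  | none => []  -- Python raises ValueError here; excluded by Pre_take_order
  | some idx =>
    if left then
      (PySem.List.slice remaining_players_ids none (some ((idx : Int) + 1))).reverse ++
      (PySem.List.slice remaining_players_ids (some ((idx : Int) + 1)) none).reverse
    else
      PySem.List.slice remaining_players_ids (some (idx : Int)) none ++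
      PySem.List.slice remaining_players_ids none (some (idx : Int))

-- ===== PRECONDITION & SPEC =====
-- A (and B) raise ValueError from list.index when first_player_id is absent; only those inputs are excluded.
def Pre_take_order (remaining_players_ids : List Int) (first_player_id : Int) (left : Bool) : Prop :=
  first_player_id ∈ remaining_players_ids
instance (remaining_players_ids : List Int) (first_player_id : Int) (left : Bool) : Decidable (Pre_take_order remaining_players_ids first_player_id left) := by unfold Pre_take_order; infer_instance
def pvWitness_take_order : List Int × Int × Bool := ([3, 1, 4, 1, 5], 4, true)

def Spec_take_order (remaining_players_ids : List Int) (first_player_id : Int) (left : Bool) (out : List Int) : Prop := out = take_order_alt remaining_players_ids first_player_id left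
instance (remaining_players_ids : List Int) (first_player_id : Int) (left : Bool) (out : List Int) : Decidable (Spec_take_order remaining_players_ids first_player_id left out) := by unfold Spec_take_order; infer_instance

-- ===== CLAIM (what is proved, stated in full; the proofs are below) =====
def Claim_equal_take_order : Prop := ∀ (remaining_players_ids : List Int) (first_player_id : Int) (left : Bool), Dom_take_order remaining_players_ids first_player_id left → Pre_take_order remaining_players_ids first_player_id left → Spec_take_order remaining_players_ids first_player_id left (take_order remaining_players_ids first_player_id left)

-- ===== LEMMAS AND PROOFS =====


theorem take_order_left_eq (xs : List Int) (idx : Nat) (hk : idx < xs.length) :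
    (List.range xs.length).map (fun (k : Nat) => PySem.List.pyGetD xs ((idx : Int) - ((k : Nat) : Int)) 0)
    = (xs.take (idx+1)).reverse ++ (xs.drop (idx+1)).reverse := by
  apply List.ext_getElem
  · simp; omega
  · intro j hj hj'
    simp only [List.length_map, List.length_range] at hj
    simp only [List.getElem_map, List.getElem_range]
    rw [List.getElem_append]
    by_cases hle : j ≤ idx
    · rw [PySem.List.pyGetD_eq_getElem xs 0 (by omega) (by omega)]
      rw [dif_pos (by simp; omega)]
      rw [List.getElem_reverse, List.getElem_take]
      congr 1
      simp; omega
    · have hneg : (idx : Int) - (j : Int) = -((j - idx : Nat) : Int) := by omega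
      rw [hneg, PySem.List.pyGetD_neg_natCast xs (j - idx) 0 (by omega) (by omega)]
      rw [dif_neg (by simp; omega)]
      rw [List.getElem_reverse, List.getElem_drop]
      congr 1
      simp; omega

theorem take_order_right_eq (xs : List Int) (idx : Nat) (hk : idx < xs.length) :
    (List.range xs.length).map (fun (k : Nat) =>
      PySem.List.pyGetD xs
        (if ((idx : Int) + (k : Int)) > (xs.length : Int) - 1
         then (idx : Int) + (k : Int) - (xs.length : Int) else (idx : Int) + (k : Int)) 0)
    = xs.drop idx ++ xs.take idx := by
  apply List.ext_getElem
  · simp; omega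
  · intro j hj hj'
    simp only [List.length_map, List.length_range] at hj
    simp only [List.getElem_map, List.getElem_range]
    rw [List.getElem_append]
    by_cases hle : j < xs.length - idx
    · rw [if_neg (by omega)]
      rw [PySem.List.pyGetD_eq_getElem xs 0 (by omega) (by omega)]
      rw [dif_pos (by simp; omega)]
      have hix : ((idx:Int) + (j:Int)).toNat = idx + j := by omega
      simp only [List.getElem_drop, hix]
    · rw [if_pos (by omega)]
      rw [PySem.List.pyGetD_eq_getElem xs 0 (by omega) (by omega)]
      rw [dif_neg (by simp; omega)]
      rw [List.getElem_take]
      congr 1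
      simp; omega

theorem take_order_main (xs : List Int) (fp : Int) (left : Bool)
    (idx : Nat) (hidx : PySem.List.index? xs fp = some idx) :
    take_order xs fp left = take_order_alt xs fp left := by
  obtain ⟨hk, -, -⟩ := PySem.List.getElem_of_index?_eq_some hidx
  have hcast : (idx : Int) + 1 = ((idx + 1 : Nat) : Int) := by push_cast; ring
  simp only [take_order, take_order_alt, hidx]
  cases left with
  | true =>
    simp only [if_true, hcast, PySem.List.slice_to_natCast, PySem.List.slice_from_natCast]
    rw [PySem.List.foldl_append_singleton_eq_map
      (f := fun i => PySem.List.pyGetD xs ((idx : Int) - i) 0)]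
    rw [PySem.List.pyRange_zero_nat, List.map_map, List.nil_append]
    exact take_order_left_eq xs idx hk
  | false =>
    simp only [Bool.false_eq_true, if_false, PySem.List.slice_to_natCast,
      PySem.List.slice_from_natCast]
    rw [PySem.List.foldl_append_singleton_eq_map
      (f := fun i => PySem.List.pyGetD xs
        (if (idx : Int) + i > (xs.length : Int) - 1
         then (idx : Int) + i - (xs.length : Int) else (idx : Int) + i) 0)]
    rw [PySem.List.pyRange_zero_nat, List.map_map, List.nil_append]
    exact take_order_right_eq xs idx hk


-- ===== VERDICT (by name: the statement is the Claim_ definition above) =====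
theorem take_order_spec : Claim_equal_take_order := by
  intro xs fp left _ hpre
  have h : ∃ idx, PySem.List.index? xs fp = some idx := by
    rcases Option.isSome_iff_exists.mp ((PySem.List.index?_isSome_iff xs fp).mpr hpre) with ⟨k, hk⟩
    exact ⟨k, hk⟩
  rcases h with ⟨idx, hidx⟩
  exact take_order_main xs fp left idx hidx
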